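-- pv_equiv track=rewrite | github.com/synthbot-anon/synthbot | src/ponysynth/pyglottal.py | compare_cycles
-- ===== SOURCE A (Python) =====
-- def compare_cycles(x, y, HP, vt=True, centered=False):
--     """ Find all markings in y within a glottal cycle
--         derived from GCI markings in x, to within a
--         maximum half-period in samples.
--     """
--
--     x = sorted(x)
--     y = sorted(y)
--
--     cycles = {i:[] for i in x}
--     bounds = {}
--     other = []
--
--     # handle edge cases in x
--     if not x: return {}, {}, y
--     x = [x[0] - 3*HP] + x + [x[-1] + 3*HP]
--     b = 0
--
--     for a in range(1, len(x)-1):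
--         lo, mid, hi = x[a-1], x[a], x[a+1]
--         # Adjust bounds to be halfway between
--         # previous and next GCI markings.
--         lo = lo + (mid - lo) // 2
--         hi = mid + (hi - mid) // 2
--
--         if mid - HP > lo:
--             if vt: # voicing transition
--                 # likely at onset of voicing,
--                 # use next period
--                 lo = max([mid-HP, 2*mid-hi])
--             else:
--                 lo = mid - HP
--
--         if mid + HP < hi:
--             if vt:
--                 # likely at offset of voicing,
--                 # use previous period
--                 hi = min([mid+HP, 2*mid-lo])
--             else:
--                 hi = mid + HP
--
--         if centered:
--             # shrink bounds such that mid is centered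
--             d = min([hi-mid, mid-lo])
--             lo, hi = mid-d, mid+d
--
--         bounds[mid] = (lo, hi)
--         # find all the indices in y within bounds
--         while b < len(y) and y[b] < hi:
--             if y[b] >= lo:
--                 cycles[mid].append(y[b])
--             else:
--                 other.append(y[b])
--             b += 1
--
--     other.extend(y[b:])  # leftover
--     return cycles, bounds, other
-- ===== SOURCE B (Python) =====
-- # Same cycle-bound computation, but the monotone element-by-element while-scan over y
-- # is replaced by binary search: each cycle's contents are a slice of sorted y located
-- # with bisect_left, clamped by a running pointer p, and `other` is built from the gaps.
--
-- def _bisect_left(a, v):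
--     lo, hi = 0, len(a)
--     while lo < hi:
--         m = (lo + hi) // 2
--         if a[m] < v:
--             lo = m + 1
--         else:
--             hi = m
--     return lo
--
-- def compare_cycles(x, y, HP, vt=True, centered=False):
--     xs = sorted(x)
--     ys = sorted(y)
--     if not xs:
--         return {}, {}, ys
--     cycles = {i: [] for i in xs}
--     bounds = {}
--     other = []
--     n = len(xs)
--     p = 0
--     for a in range(n):
--         prev = xs[a - 1] if a > 0 else xs[0] - 3 * HP
--         mid = xs[a]
--         nxt = xs[a + 1] if a + 1 < n else xs[-1] + 3 * HP
--         lo = prev + (mid - prev) // 2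
--         hi = mid + (nxt - mid) // 2
--         if mid - HP > lo:
--             lo = max(mid - HP, 2 * mid - hi) if vt else mid - HP
--         if mid + HP < hi:
--             hi = min(mid + HP, 2 * mid - lo) if vt else mid + HP
--         if centered:
--             d = min(hi - mid, mid - lo)
--             lo, hi = mid - d, mid + d
--         bounds[mid] = (lo, hi)
--         s = _bisect_left(ys, lo)
--         e = _bisect_left(ys, hi)
--         other.extend(ys[p:max(p, min(s, e))])
--         cycles[mid].extend(ys[max(p, s):max(p, e)])
--         p = max(p, e)
--     other.extend(ys[p:])
--     return cycles, bounds, other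
-- ===== Notes on version B (the rewrite author's own statement) =====
-- stated objective: alternative
-- what changed: The monotone element-by-element while-scan over sorted y is replaced by binary search (bisect_left) per cycle: each cycle's contents become one contiguous slice of sorted y clamped by a running pointer, and `other` is rebuilt from the gaps between consecutive windows plus the tail.
import Mathlib
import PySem

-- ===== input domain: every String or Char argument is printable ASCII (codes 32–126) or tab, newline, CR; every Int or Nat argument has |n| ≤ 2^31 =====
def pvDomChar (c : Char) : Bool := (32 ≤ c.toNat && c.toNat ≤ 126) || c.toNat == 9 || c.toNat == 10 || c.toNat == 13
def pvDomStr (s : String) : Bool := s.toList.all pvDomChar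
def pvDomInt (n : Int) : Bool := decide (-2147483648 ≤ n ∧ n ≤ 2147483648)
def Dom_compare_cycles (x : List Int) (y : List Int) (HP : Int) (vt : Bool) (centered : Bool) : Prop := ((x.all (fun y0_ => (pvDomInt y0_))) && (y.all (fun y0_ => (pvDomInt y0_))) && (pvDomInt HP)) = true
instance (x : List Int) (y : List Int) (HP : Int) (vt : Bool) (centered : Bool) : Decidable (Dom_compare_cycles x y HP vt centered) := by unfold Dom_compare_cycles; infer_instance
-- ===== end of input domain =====

-- B replaces A's element-by-element monotone while-scan over sorted y by binary search
-- (bisect_left) and contiguous slices, rebuilding `other` from the gaps between the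
-- pointer-clamped cycle windows; objective: alternative decomposition, same exact values.

-- ===== PORT A =====
-- the inner `while b < len(y) and y[b] < hi` loop of A (mutates cycles[mid], other, b)
def whileA (ys : List Int) (lo hi mid : Int) (cy : PySem.Dict Int (List Int))
    (other : List Int) (b : Nat) : PySem.Dict Int (List Int) × List Int × Nat :=
  if h : b < ys.length ∧ PySem.List.pyGetD ys (b : Int) 0 < hi then
    if lo ≤ PySem.List.pyGetD ys (b : Int) 0 then
      whileA ys lo hi mid (cy.modify mid [] (· ++ [PySem.List.pyGetD ys (b : Int) 0])) other (b + 1)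
    else
      whileA ys lo hi mid cy (other ++ [PySem.List.pyGetD ys (b : Int) 0]) (b + 1)
  else (cy, other, b)
termination_by ys.length - b
decreasing_by all_goals omega

-- one iteration of A's `for a in range(1, len(x)-1)` loop; state = (cycles, bounds, other, b)
def stepA (ys xp : List Int) (HP : Int) (vt centered : Bool)
    (st : PySem.Dict Int (List Int) × PySem.Dict Int (Int × Int) × List Int × Nat) (a : Int) :
    PySem.Dict Int (List Int) × PySem.Dict Int (Int × Int) × List Int × Nat :=
  let lo0 := PySem.List.pyGetD xp (a - 1) 0
  let mid := PySem.List.pyGetD xp a 0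
  let hi0 := PySem.List.pyGetD xp (a + 1) 0
  let lo1 := lo0 + PySem.Int.floordiv (mid - lo0) 2
  let hi1 := mid + PySem.Int.floordiv (hi0 - mid) 2
  let lo2 := if mid - HP > lo1 then (if vt then max (mid - HP) (2 * mid - hi1) else mid - HP) else lo1
  let hi2 := if mid + HP < hi1 then (if vt then min (mid + HP) (2 * mid - lo2) else mid + HP) else hi1
  let lo3 := if centered then mid - min (hi2 - mid) (mid - lo2) else lo2
  let hi3 := if centered then mid + min (hi2 - mid) (mid - lo2) else hi2
  let bd' := st.2.1.insert mid (lo3, hi3)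
  let r := whileA ys lo3 hi3 mid st.1 st.2.2.1 st.2.2.2
  (r.1, bd', r.2.1, r.2.2)

def compare_cycles (x : List Int) (y : List Int) (HP : Int) (vt : Bool) (centered : Bool) :
    (List (Int × List Int)) × (List (Int × Int × Int)) × List Int :=
  let xs := PySem.List.sorted x (fun v => v)
  let ys := PySem.List.sorted y (fun v => v)
  let cycles := xs.foldl (fun d i => d.insert i ([] : List Int)) (PySem.Dict.mk [])
  if xs = [] then ([], [], ys)
  else
    let xp := [PySem.List.pyGetD xs 0 0 - 3 * HP] ++ xs ++ [PySem.List.pyGetD xs (-1) 0 + 3 * HP]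
    let st := (PySem.List.pyRange 1 ((xp.length : Int) - 1)).foldl
      (stepA ys xp HP vt centered) (cycles, PySem.Dict.mk [], [], 0)
    (st.1.items, st.2.1.items, st.2.2.1 ++ PySem.List.slice ys (some (st.2.2.2 : Int)) none)

-- ===== PORT B =====
-- one iteration of B's `for a in range(n)` loop; Source B's hand-written `_bisect_left`
-- is the textbook bisect_left binary search, which is exactly PySem.List.bisectLeft
def stepB (ys xs : List Int) (HP : Int) (vt centered : Bool) (n : Nat)
    (st : PySem.Dict Int (List Int) × PySem.Dict Int (Int × Int) × List Int × Nat) (a : Int) :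
    PySem.Dict Int (List Int) × PySem.Dict Int (Int × Int) × List Int × Nat :=
  let prev := if a > 0 then PySem.List.pyGetD xs (a - 1) 0 else PySem.List.pyGetD xs 0 0 - 3 * HP
  let mid := PySem.List.pyGetD xs a 0
  let nxt := if a + 1 < (n : Int) then PySem.List.pyGetD xs (a + 1) 0 else PySem.List.pyGetD xs (-1) 0 + 3 * HP
  let lo1 := prev + PySem.Int.floordiv (mid - prev) 2
  let hi1 := mid + PySem.Int.floordiv (nxt - mid) 2
  let lo2 := if mid - HP > lo1 then (if vt then max (mid - HP) (2 * mid - hi1) else mid - HP) else lo1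
  let hi2 := if mid + HP < hi1 then (if vt then min (mid + HP) (2 * mid - lo2) else mid + HP) else hi1
  let lo3 := if centered then mid - min (hi2 - mid) (mid - lo2) else lo2
  let hi3 := if centered then mid + min (hi2 - mid) (mid - lo2) else hi2
  let s := PySem.List.bisectLeft ys lo3
  let e := PySem.List.bisectLeft ys hi3
  let p := st.2.2.2
  let oth' := st.2.2.1 ++ PySem.List.slice ys (some (p : Int)) (some ((max p (min s e) : Nat) : Int))
  let cy' := st.1.modify mid [] (· ++ PySem.List.slice ys (some ((max p s : Nat) : Int)) (some ((max p e : Nat) : Int)))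
  (cy', st.2.1.insert mid (lo3, hi3), oth', max p e)

def compare_cycles_alt (x : List Int) (y : List Int) (HP : Int) (vt : Bool) (centered : Bool) :
    (List (Int × List Int)) × (List (Int × Int × Int)) × List Int :=
  let xs := PySem.List.sorted x (fun v => v)
  let ys := PySem.List.sorted y (fun v => v)
  if xs = [] then ([], [], ys)
  else
    let cycles := xs.foldl (fun d i => d.insert i ([] : List Int)) (PySem.Dict.mk [])
    let st := (PySem.List.pyRange 0 (xs.length : Int)).foldl
      (stepB ys xs HP vt centered xs.length) (cycles, PySem.Dict.mk [], [], 0)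
    (st.1.items, st.2.1.items, st.2.2.1 ++ PySem.List.slice ys (some (st.2.2.2 : Int)) none)

-- ===== PRECONDITION & SPEC =====
def Spec_compare_cycles (x : List Int) (y : List Int) (HP : Int) (vt : Bool) (centered : Bool) (out : (List (Int × List Int)) × (List (Int × Int × Int)) × List Int) : Prop := out = compare_cycles_alt x y HP vt centered
instance (x : List Int) (y : List Int) (HP : Int) (vt : Bool) (centered : Bool) (out : (List (Int × List Int)) × (List (Int × Int × Int)) × List Int) : Decidable (Spec_compare_cycles x y HP vt centered out) := by unfold Spec_compare_cycles; infer_instance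

-- ===== CLAIM (what is proved, stated in full; the proofs are below) =====
def Claim_equal_compare_cycles : Prop := ∀ (x : List Int) (y : List Int) (HP : Int) (vt : Bool) (centered : Bool), Dom_compare_cycles x y HP vt centered → Spec_compare_cycles x y HP vt centered (compare_cycles x y HP vt centered)

-- ===== LEMMAS AND PROOFS =====

-- dict plumbing -------------------------------------------------------------

theorem dict_contains_iff {ν : Type} (d : PySem.Dict Int ν) (k : Int) :
    d.contains k = true ↔ k ∈ d.keys := by
  simp [PySem.Dict.contains, PySem.Dict.keys, List.any_eq_true, List.mem_map]

theorem dict_keys_insert {ν : Type} (d : PySem.Dict Int ν) (k : Int) (v : ν) :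
    (d.insert k v).keys = if d.contains k then d.keys else d.keys ++ [k] := by
  by_cases h : d.contains k
  · simp only [PySem.Dict.insert, h, if_true, PySem.Dict.keys, List.map_map]
    refine List.map_congr_left ?_
    intro p _
    by_cases hp : p.1 == k
    · simp [Function.comp, hp, (eq_of_beq hp).symm]
    · simp [Function.comp, hp]
  · simp [PySem.Dict.insert, h, PySem.Dict.keys]

theorem dict_nodup_insert {ν : Type} (d : PySem.Dict Int ν) (k : Int) (v : ν)
    (h : d.keys.Nodup) : (d.insert k v).keys.Nodup := by
  rw [dict_keys_insert]
  by_cases hc : d.contains k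
  · simpa [hc]
  · have h2 : d.contains k = false := by simpa using hc
    have hk : k ∉ d.keys := fun hmem => hc ((dict_contains_iff d k).mpr hmem)
    simp only [h2, Bool.false_eq_true, if_false]
    rw [List.nodup_append]
    refine ⟨h, List.nodup_singleton k, ?_⟩
    intro a ha b hb
    rw [List.mem_singleton] at hb
    subst hb
    exact fun heq => hk (heq ▸ ha)

theorem dict_insert_insert {ν : Type} (d : PySem.Dict Int ν) (k : Int) (v w : ν) :
    (d.insert k v).insert k w = d.insert k w := by
  have hcontains : (d.insert k v).contains k = true := by
    rw [dict_contains_iff, PySem.Dict.mem_keys_insert]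
    exact Or.inl rfl
  by_cases h : d.contains k
  · simp only [PySem.Dict.insert, h, if_true] at hcontains ⊢
    simp only [hcontains, if_true, List.map_map]
    congr 1
    refine List.map_congr_left ?_
    intro p _
    by_cases hp : p.1 == k
    · simp [Function.comp, hp]
    · simp [Function.comp, hp]
  · have h' : d.contains k = false := by simpa using h
    have hall : ∀ p ∈ d.items, (p.1 == k) = false :=
      fun p hp => Bool.eq_false_iff.mpr (List.any_eq_false.mp h' p hp)
    have hi1 : d.insert k v = PySem.Dict.mk (d.items ++ [(k, v)]) := by
      simp [PySem.Dict.insert, h']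
    have hc2 : (PySem.Dict.mk (d.items ++ [(k, v)]) : PySem.Dict Int ν).contains k = true := by
      show (d.items ++ [(k, v)]).any (fun p => p.1 == k) = true
      rw [List.any_append]
      simp
    rw [hi1]
    simp only [PySem.Dict.insert, hc2, if_true, h', Bool.false_eq_true, if_false]
    congr 1
    show (d.items ++ [(k, v)]).map (fun p => if p.1 == k then (k, w) else p) = d.items ++ [(k, w)]
    rw [List.map_append]
    congr 1
    · calc d.items.map (fun p => if p.1 == k then (k, w) else p)
          = d.items.map id := List.map_congr_left (fun p hp => by simp [hall p hp])
        _ = d.items := List.map_id _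
    · simp

theorem find_replace_id {ν : Type} (k : Int) (its : List (Int × ν))
    (hnd : (its.map Prod.fst).Nodup) (pr : Int × ν)
    (hf : its.find? (fun p => p.1 == k) = some pr) :
    its.map (fun p => if p.1 == k then (k, pr.2) else p) = its := by
  induction its with
  | nil => simp at hf
  | cons hd tl ih =>
    simp only [List.map_cons, List.nodup_cons] at hnd
    by_cases h : hd.1 == k
    · rw [List.find?_cons_of_pos (by simpa using h)] at hf
      have hpr : pr = hd := by injection hf with h'; exact h'.symm
      have hk : hd.1 = k := eq_of_beq h
      have htl : ∀ p ∈ tl, (p.1 == k) = false := by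
        intro p hp
        rw [Bool.eq_false_iff]
        intro hne
        have hpk : p.1 = k := eq_of_beq hne
        exact hnd.1 (by rw [hk, ← hpk]; exact List.mem_map_of_mem hp)
      simp only [List.map_cons, h, if_true, hpr]
      congr 1
      · rw [← hk]
      · calc tl.map (fun p => if p.1 == k then (k, hd.2) else p)
            = tl.map id := List.map_congr_left (fun p hp => by simp [htl p hp])
          _ = tl := List.map_id _
    · have h' : (hd.1 == k) = false := Bool.eq_false_iff.mpr h
      rw [List.find?_cons_of_neg (by simpa using h)] at hf
      simp only [List.map_cons, h', Bool.false_eq_true, if_false]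
      rw [ih hnd.2 hf]

theorem dict_insert_getD_self {ν : Type} (d : PySem.Dict Int ν) (k : Int) (d0 : ν)
    (hc : d.contains k = true) (hnd : d.keys.Nodup) :
    d.insert k (d.getD k d0) = d := by
  obtain ⟨p, hp, hpk⟩ := List.any_eq_true.mp hc
  have hf : ∃ pr, d.items.find? (fun q => q.1 == k) = some pr := by
    have : (d.items.find? (fun q => q.1 == k)).isSome := List.find?_isSome.mpr ⟨p, hp, hpk⟩
    exact Option.isSome_iff_exists.mp this
  obtain ⟨pr, hpr⟩ := hf
  have hgetD : d.getD k d0 = pr.2 := by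
    simp [PySem.Dict.getD, PySem.Dict.get?, hpr]
  simp only [PySem.Dict.insert, hc, if_true, hgetD]
  have := find_replace_id k d.items hnd pr hpr
  cases d with
  | mk its => simpa using this

theorem dict_modify_modify {ν : Type} (d : PySem.Dict Int ν) (k : Int) (d0 : ν) (f g : ν → ν) :
    (d.modify k d0 f).modify k d0 g = d.modify k d0 (fun v => g (f v)) := by
  simp only [PySem.Dict.modify]
  rw [PySem.Dict.getD_insert_self, dict_insert_insert]

theorem dict_modify_nil {ν : Type} (d : PySem.Dict Int (List ν)) (k : Int)
    (hc : d.contains k = true) (hnd : d.keys.Nodup) :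
    (d.modify k [] (fun l => l)) = d := by
  simp only [PySem.Dict.modify]
  exact dict_insert_getD_self d k [] hc hnd

-- bisect facts --------------------------------------------------------------

theorem bisect_le_len (ys : List Int) (v : Int)
    (hys : List.Pairwise (· ≤ ·) ys) : PySem.List.bisectLeft ys v ≤ ys.length :=
  (PySem.List.bisectLeft_spec ys v hys).1

theorem bisect_lt_iff (ys : List Int) (hys : List.Pairwise (· ≤ ·) ys) (v : Int)
    (b : Nat) (hb : b < ys.length) :
    (ys.getD b 0 < v ↔ b < PySem.List.bisectLeft ys v) := by
  obtain ⟨h1, h2, h3⟩ := PySem.List.bisectLeft_spec ys v hys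
  rw [List.getD_eq_getElem ys 0 hb]
  constructor
  · intro h
    by_contra hle
    push_neg at hle
    exact absurd h (not_lt.mpr (h3 b hb hle))
  · intro h
    exact h2 b hb h

-- the core: A's while-scan equals B's bisect-windows -------------------------

theorem whileA_eq (ys : List Int) (hys : List.Pairwise (· ≤ ·) ys) (lo hi mid : Int) :
    ∀ (fuel b : Nat) (cy : PySem.Dict Int (List Int)) (oth : List Int),
      ys.length - b ≤ fuel →
      cy.contains mid = true → cy.keys.Nodup →
      whileA ys lo hi mid cy oth b =
        (cy.modify mid []
            (· ++ (ys.drop (max b (PySem.List.bisectLeft ys lo))).take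
              (max b (PySem.List.bisectLeft ys hi) - max b (PySem.List.bisectLeft ys lo))),
         oth ++ (ys.drop b).take
            (max b (min (PySem.List.bisectLeft ys lo) (PySem.List.bisectLeft ys hi)) - b),
         max b (PySem.List.bisectLeft ys hi)) := by
  intro fuel
  set s := PySem.List.bisectLeft ys lo with hs
  set e := PySem.List.bisectLeft ys hi with he
  have hse : s ≤ ys.length := bisect_le_len ys lo hys
  have hee : e ≤ ys.length := bisect_le_len ys hi hys
  induction fuel with
  | zero =>
    intro b cy oth hfuel hc hnd
    have hb : ys.length ≤ b := by omega
    rw [whileA, dif_neg (by omega)]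
    have h1 : max b e = b := by omega
    have h2 : max b (min s e) - b = 0 := by omega
    have h3 : max b e - max b s = 0 := by omega
    rw [h3, h2, h1]
    simp only [List.take_zero, List.append_nil]
    rw [dict_modify_nil cy mid hc hnd]
  | succ f ih =>
    intro b cy oth hfuel hc hnd
    by_cases hcond : b < ys.length ∧ PySem.List.pyGetD ys (b : Int) 0 < hi
    · -- loop body runs
      obtain ⟨hblen, hvlt⟩ := hcond
      rw [PySem.List.pyGetD_natCast] at hvlt
      have hbe : b < e := by rw [he]; exact (bisect_lt_iff ys hys hi b hblen).mp hvlt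
      have hmaxbe : max b e = e := by omega
      have hmaxb1e : max (b + 1) e = e := by omega
      rw [whileA, dif_pos ⟨hblen, by rw [PySem.List.pyGetD_natCast]; exact hvlt⟩]
      rw [PySem.List.pyGetD_natCast]
      set v := ys.getD b 0 with hv
      have hdrop : ys.drop b = v :: ys.drop (b + 1) := by
        rw [hv, List.getD_eq_getElem ys 0 hblen]
        exact (List.drop_eq_getElem_cons hblen)
      by_cases hlov : lo ≤ v
      · -- goes into the cycle
        have hsb : s ≤ b := by
          by_contra hgt
          push_neg at hgt
          exact absurd ((bisect_lt_iff ys hys lo b hblen).mpr (by omega)) (by omega)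
        rw [if_pos hlov]
        rw [ih (b + 1) (cy.modify mid [] (· ++ [v])) oth (by omega)
          (by rw [PySem.Dict.contains_modify]; simp [hc])
          (by rw [show (cy.modify mid [] (· ++ [v])).keys = _ from PySem.Dict.keys_modify cy mid [] _]
              exact dict_nodup_insert cy mid _ hnd)]
        rw [dict_modify_modify]
        have h1 : max b s = b := by omega
        have h2 : max (b + 1) s = b + 1 := by omega
        have h3 : max (b + 1) (min s e) - (b + 1) = 0 := by omega
        have h4 : max b (min s e) - b = 0 := by omega
        rw [h1, h2, h3, h4, hmaxbe, hmaxb1e]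
        simp only [List.take_zero, List.append_nil]
        have hfun : (fun l : List Int => l ++ [v] ++ List.take (e - (b + 1)) (List.drop (b + 1) ys))
            = (fun l : List Int => l ++ List.take (e - b) (List.drop b ys)) := by
          funext l
          rw [List.append_assoc]
          congr 1
          rw [hdrop]
          have hsplit : e - b = (e - (b + 1)) + 1 := by omega
          rw [hsplit, List.take_succ_cons]
          exact List.singleton_append
        rw [hfun]
      · -- goes into other
        push_neg at hlov
        have hbs : b < s := by rw [hs]; exact (bisect_lt_iff ys hys lo b hblen).mp hlov
        rw [if_neg (by omega)]
        rw [ih (b + 1) cy (oth ++ [v]) (by omega) hc hnd]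
        have h1 : max b s = s := by omega
        have h2 : max (b + 1) s = s := by omega
        have h3 : max b (min s e) = min s e := by omega
        have h4 : max (b + 1) (min s e) = min s e := by omega
        rw [h1, h2, h3, h4, hmaxbe, hmaxb1e]
        have hoth : (oth ++ [v]) ++ List.take (min s e - (b + 1)) (List.drop (b + 1) ys)
            = oth ++ List.take (min s e - b) (List.drop b ys) := by
          rw [List.append_assoc]
          congr 1
          rw [hdrop]
          have hsplit : min s e - b = (min s e - (b + 1)) + 1 := by omega
          rw [hsplit, List.take_succ_cons]
          exact List.singleton_append
        rw [hoth]
    · -- loop stops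
      rw [whileA, dif_neg hcond]
      have heb : e ≤ b := by
        by_cases hblen : b < ys.length
        · have : ¬ PySem.List.pyGetD ys (b : Int) 0 < hi := fun h => hcond ⟨hblen, h⟩
          rw [PySem.List.pyGetD_natCast] at this
          have := (bisect_lt_iff ys hys hi b hblen).not.mp this
          omega
        · omega
      have h1 : max b e = b := by omega
      have h2 : max b (min s e) - b = 0 := by omega
      have h3 : max b e - max b s = 0 := by omega
      rw [h3, h2, h1]
      simp only [List.take_zero, List.append_nil]
      rw [dict_modify_nil cy mid hc hnd]

-- per-iteration equality -----------------------------------------------------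

theorem step_eq (ys xs : List Int) (hys : List.Pairwise (· ≤ ·) ys) (HP : Int)
    (vt centered : Bool) (j : Nat) (hj : j < xs.length) (hxs : xs ≠ [])
    (st : PySem.Dict Int (List Int) × PySem.Dict Int (Int × Int) × List Int × Nat)
    (hc : ∀ v ∈ xs, st.1.contains v = true) (hnd : st.1.keys.Nodup) :
    stepA ys ([PySem.List.pyGetD xs 0 0 - 3 * HP] ++ xs ++ [PySem.List.pyGetD xs (-1) 0 + 3 * HP])
        HP vt centered st ((j : Int) + 1)
      = stepB ys xs HP vt centered xs.length st (j : Int) := by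
  set h0 := PySem.List.pyGetD xs 0 0 - 3 * HP with hh0
  set t0 := PySem.List.pyGetD xs (-1) 0 + 3 * HP with ht0
  set xp := [h0] ++ xs ++ [t0] with hxp
  -- index bridge: xp.getD (j+1) = xs.getD j etc.
  have hmid : PySem.List.pyGetD xp ((j : Int) + 1) 0 = PySem.List.pyGetD xs (j : Int) 0 := by
    have : ((j : Int) + 1) = ((j + 1 : Nat) : Int) := by push_cast; ring
    rw [this, PySem.List.pyGetD_natCast, PySem.List.pyGetD_natCast, hxp]
    show ((h0 :: (xs ++ [t0])).getD (j + 1) 0) = xs.getD j 0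
    rw [List.getD_cons_succ, List.getD_append _ _ _ _ hj]
  have hprev : PySem.List.pyGetD xp ((j : Int) + 1 - 1) 0
      = (if (j : Int) > 0 then PySem.List.pyGetD xs ((j : Int) - 1) 0 else h0) := by
    have hidx : ((j : Int) + 1 - 1) = ((j : Nat) : Int) := by ring
    rw [hidx, PySem.List.pyGetD_natCast]
    cases j with
    | zero => simp [hxp]
    | succ jj =>
      have : ((jj + 1 : Nat) : Int) > 0 := by positivity
      rw [if_pos this]
      have : ((jj + 1 : Nat) : Int) - 1 = ((jj : Nat) : Int) := by push_cast; ring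
      rw [this, PySem.List.pyGetD_natCast, hxp]
      show ((h0 :: (xs ++ [t0])).getD (jj + 1) 0) = xs.getD jj 0
      rw [List.getD_cons_succ, List.getD_append _ _ _ _ (by omega)]
  have hnxt : PySem.List.pyGetD xp ((j : Int) + 1 + 1) 0
      = (if (j : Int) + 1 < (xs.length : Int) then PySem.List.pyGetD xs ((j : Int) + 1) 0 else t0) := by
    have hidx : ((j : Int) + 1 + 1) = ((j + 2 : Nat) : Int) := by push_cast; ring
    rw [hidx, PySem.List.pyGetD_natCast]
    have hshow : xp.getD (j + 2) 0 = (xs ++ [t0]).getD (j + 1) 0 := by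
      rw [hxp]
      show ((h0 :: (xs ++ [t0])).getD (j + 2) 0) = (xs ++ [t0]).getD (j + 1) 0
      rw [List.getD_cons_succ]
    rw [hshow]
    by_cases hlt : j + 1 < xs.length
    · rw [if_pos (by exact_mod_cast hlt), List.getD_append _ _ _ _ hlt]
      have : ((j : Int) + 1) = ((j + 1 : Nat) : Int) := by push_cast; ring
      rw [this, PySem.List.pyGetD_natCast]
    · have hj1 : j + 1 = xs.length := by omega
      rw [if_neg (by exact_mod_cast hlt), List.getD_append_right _ _ _ _ (by omega)]
      simp [hj1]
  -- now unfold both steps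
  simp only [stepA, stepB]
  rw [hprev, hmid, hnxt]
  -- the bound computations are now syntactically identical; name them
  set mid := PySem.List.pyGetD xs (j : Int) 0 with hmiddef
  set prev := (if (j : Int) > 0 then PySem.List.pyGetD xs ((j : Int) - 1) 0 else h0) with hprevdef
  set nxt := (if (j : Int) + 1 < (xs.length : Int) then PySem.List.pyGetD xs ((j : Int) + 1) 0 else t0) with hnxtdef
  set lo1 := prev + PySem.Int.floordiv (mid - prev) 2 with hlo1
  set hi1 := mid + PySem.Int.floordiv (nxt - mid) 2 with hhi1
  set lo2 := (if mid - HP > lo1 then (if vt then max (mid - HP) (2 * mid - hi1) else mid - HP) else lo1) with hlo2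
  set hi2 := (if mid + HP < hi1 then (if vt then min (mid + HP) (2 * mid - lo2) else mid + HP) else hi1) with hhi2
  set lo3 := (if centered then mid - min (hi2 - mid) (mid - lo2) else lo2) with hlo3
  set hi3 := (if centered then mid + min (hi2 - mid) (mid - lo2) else hi2) with hhi3
  have hcontains : st.1.contains mid = true := by
    apply hc
    rw [hmiddef, PySem.List.pyGetD_natCast]
    rw [List.getD_eq_getElem xs 0 hj]
    exact List.getElem_mem hj
  have hwa := whileA_eq ys hys lo3 hi3 mid (ys.length - st.2.2.2) st.2.2.2 st.1 st.2.2.1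
    (by omega) hcontains hnd
  rw [hwa]
  -- convert slices to drop/take
  rw [PySem.List.slice_natCast, PySem.List.slice_natCast]

-- fold equality with the dict invariant ---------------------------------------

theorem fold_eq (ys xs : List Int) (hys : List.Pairwise (· ≤ ·) ys) (HP : Int)
    (vt centered : Bool) (hxs : xs ≠ []) :
    ∀ (l : List Nat), (∀ j ∈ l, j < xs.length) →
    ∀ (st : PySem.Dict Int (List Int) × PySem.Dict Int (Int × Int) × List Int × Nat),
      (∀ v ∈ xs, st.1.contains v = true) → st.1.keys.Nodup →
      l.foldl (fun acc (k : Nat) =>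
          stepA ys ([PySem.List.pyGetD xs 0 0 - 3 * HP] ++ xs ++ [PySem.List.pyGetD xs (-1) 0 + 3 * HP])
            HP vt centered acc ((k : Int) + 1)) st
        = l.foldl (fun acc (k : Nat) => stepB ys xs HP vt centered xs.length acc (k : Int)) st := by
  intro l
  induction l with
  | nil => intro _ st _ _; rfl
  | cons j rest ih =>
    intro hl st hc hnd
    rw [List.foldl_cons, List.foldl_cons]
    rw [step_eq ys xs hys HP vt centered j (hl j (List.mem_cons_self)) hxs st hc hnd]
    apply ih (fun k hk => hl k (List.mem_cons_of_mem _ hk))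
    · -- contains preserved: stepB's new cycles dict is a modify of the old
      intro v hv
      simp only [stepB, PySem.Dict.contains_modify]
      simp [hc v hv]
    · -- nodup preserved
      simp only [stepB]
      rw [show (PySem.Dict.modify _ _ _ _).keys = _ from PySem.Dict.keys_modify _ _ _ _]
      exact dict_nodup_insert _ _ _ hnd

-- initial dict invariants ------------------------------------------------------

theorem init_contains (l : List Int) :
    ∀ (d : PySem.Dict Int (List Int)) (v : Int),
      (v ∈ l ∨ d.contains v = true) →
      (l.foldl (fun d i => d.insert i ([] : List Int)) d).contains v = true := by
  induction l with
  | nil =>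
    intro d v h
    rcases h with h | h
    · simp at h
    · simpa using h
  | cons hd tl ih =>
    intro d v h
    simp only [List.foldl_cons]
    apply ih
    rcases h with h | h
    · rcases List.mem_cons.mp h with h | h
      · right
        rw [dict_contains_iff, PySem.Dict.mem_keys_insert]
        exact Or.inl h
      · exact Or.inl h
    · right
      rw [dict_contains_iff, PySem.Dict.mem_keys_insert]
      right
      exact (dict_contains_iff d v).mp h

theorem init_nodup (l : List Int) :
    ∀ (d : PySem.Dict Int (List Int)), d.keys.Nodup →
      (l.foldl (fun d i => d.insert i ([] : List Int)) d).keys.Nodup := by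
  induction l with
  | nil => intro d h; simpa using h
  | cons hd tl ih =>
    intro d h
    simp only [List.foldl_cons]
    exact ih _ (dict_nodup_insert d hd [] h)

-- ===== VERDICT (by name: the statement is the Claim_ definition above) =====
theorem compare_cycles_spec : Claim_equal_compare_cycles := by
  unfold Claim_equal_compare_cycles
  intro x y HP vt centered _
  unfold Spec_compare_cycles
  unfold compare_cycles compare_cycles_alt
  set xs := PySem.List.sorted x (fun v => v) with hxs
  set ys := PySem.List.sorted y (fun v => v) with hys
  by_cases hnil : xs = []
  · simp [hnil]
  · simp only [if_neg hnil]
    have hsorted : List.Pairwise (· ≤ ·) ys := PySem.List.sorted_pairwise y (fun v => v)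
    have hlen : ((([PySem.List.pyGetD xs 0 0 - 3 * HP] ++ xs ++ [PySem.List.pyGetD xs (-1) 0 + 3 * HP]).length : Int) - 1)
        = (xs.length : Int) + 1 := by
      simp [List.length_append]
    rw [hlen]
    have hrangeA : PySem.List.pyRange 1 ((xs.length : Int) + 1)
        = (List.range xs.length).map (fun (k : Nat) => 1 + (k : Int)) := by
      rw [PySem.List.pyRange_one]
      have h2 : ((xs.length : Int) + 1 - 1).toNat = xs.length := by omega
      rw [h2]
    have hrangeB : PySem.List.pyRange 0 (xs.length : Int)
        = (List.range xs.length).map (fun (k : Nat) => (k : Int)) := PySem.List.pyRange_zero_nat _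
    rw [hrangeA, hrangeB, List.foldl_map, List.foldl_map]
    have hbody : ∀ (st : PySem.Dict Int (List Int) × PySem.Dict Int (Int × Int) × List Int × Nat) (k : Nat),
        stepA ys ([PySem.List.pyGetD xs 0 0 - 3 * HP] ++ xs ++ [PySem.List.pyGetD xs (-1) 0 + 3 * HP])
          HP vt centered st (1 + (k : Int))
        = stepA ys ([PySem.List.pyGetD xs 0 0 - 3 * HP] ++ xs ++ [PySem.List.pyGetD xs (-1) 0 + 3 * HP])
          HP vt centered st ((k : Int) + 1) := by
      intro st k
      rw [add_comm 1 ((k : Nat) : Int)]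
    simp only [hbody]
    rw [fold_eq ys xs hsorted HP vt centered hnil (List.range xs.length)
      (fun j hj => List.mem_range.mp hj) _
      (fun v hv => init_contains xs (PySem.Dict.mk []) v (Or.inl hv))
      (init_nodup xs (PySem.Dict.mk []) (by simp [PySem.Dict.keys]))]
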